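-- pv_equiv track=rewrite | github.com/emranB/python-algorithms-challenge | __main__.py | question3
-- ===== SOURCE A (Python) =====
-- from typing import Callable, Sequence, TypeVar
--
-- def question3(values: Sequence[int]) -> int:
--     """
--     ALGORITHM: Optimized subarray sum counting with prefix sums
--     PHILOSOPHY: Use prefix sums to efficiently calculate subarray sums without recalculation
--     STEPS:
--     1. Use nested loops but with running sum to avoid recalculation
--     2. Track frequency of each sum in hash map efficiently
--     3. Use early termination where possible
--     4. Return maximum frequency found
--     """
--     # Handle edge cases
--     if values is None or not isinstance(values, (list, tuple)):
--         return 0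
--
--     if not values:  # Empty array
--         return 0
--
--     # Count frequency of each sum - optimized approach
--     sum_counts = {}
--     n = len(values)
--
--     # Generate all subarray sums more efficiently
--     for start in range(n):
--         current_sum = 0
--         for end in range(start, n):
--             current_sum += values[end]
--             sum_counts[current_sum] = sum_counts.get(current_sum, 0) + 1
--
--     # Return the maximum count efficiently
--     return max(sum_counts.values()) if sum_counts else 0
-- ===== SOURCE B (Python) =====
-- def question3(values):
--     # Same guards as the task: non-sequence -> 0, empty -> 0.
--     if values is None or not isinstance(values, (list, tuple)):
--         return 0
--     if not values:
--         return 0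
--     # Group subarray sums by right endpoint: a subarray ending at position j has
--     # sum P_j - q for a prefix value q seen before j.  Keep a counter of the
--     # distinct prefix values seen so far and add its multiplicities wholesale.
--     seen = {0: 1}          # counter of prefix sums seen so far
--     sums = {}              # counter of subarray sums
--     p = 0
--     for v in values:
--         p += v
--         for q, c in seen.items():
--             sums[p - q] = sums.get(p - q, 0) + c
--         seen[p] = seen.get(p, 0) + 1
--     return max(sums.values())
-- ===== Notes on version B (the rewrite author's own statement) =====
-- stated objective: alternative
-- what changed: B groups subarray sums by right endpoint, maintaining a counter of distinct prefix-sum values seen so far and adding each distinct prefix's multiplicity in one step, instead of A's per-start running-sum enumeration of every (start,end) pair.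
import Mathlib
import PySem

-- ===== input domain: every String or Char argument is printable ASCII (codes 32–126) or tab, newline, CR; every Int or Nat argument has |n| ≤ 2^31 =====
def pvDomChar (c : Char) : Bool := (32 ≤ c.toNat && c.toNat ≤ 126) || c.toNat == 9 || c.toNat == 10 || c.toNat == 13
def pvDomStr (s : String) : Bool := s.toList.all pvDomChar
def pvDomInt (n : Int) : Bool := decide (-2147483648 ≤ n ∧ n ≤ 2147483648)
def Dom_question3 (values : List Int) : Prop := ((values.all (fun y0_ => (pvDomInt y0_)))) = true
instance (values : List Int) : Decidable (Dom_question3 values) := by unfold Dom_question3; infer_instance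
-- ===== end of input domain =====

-- B iterates by right endpoint over a counter of distinct prefix-sum values (alternative algorithm, same results).
-- ===== PORT A =====
-- inner loop 'for end in range(start, n): current_sum += values[end]; sum_counts[current_sum] = ...'
-- (values[end] is always in range here, so pyGetD is exact)
def stepA (values : List Int) (d : PySem.Dict Int Int) (start : Int) : PySem.Dict Int Int :=
  ((PySem.List.pyRange start (values.length : Int) 1).foldl
    (fun (st : Int × PySem.Dict Int Int) e =>
      let c := st.1 + PySem.List.pyGetD values e 0
      (c, st.2.insert c (st.2.getD c 0 + 1)))
    (0, d)).2

def question3 (values : List Int) : Int :=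
  -- 'values is None or not isinstance(...)' never fires for a list argument
  if values = [] then 0
  else
    let sc := (PySem.List.pyRange 0 (values.length : Int) 1).foldl (stepA values) PySem.Dict.empty
    -- 'max(sum_counts.values()) if sum_counts else 0'; max is on a nonempty list here, so .getD 0 is exact
    if sc.items ≠ [] then (PySem.List.max? sc.values (fun x => x)).getD 0 else 0

-- ===== PORT B =====
-- one step of B's loop: p += v; for q, c in seen.items(): sums[p-q] = sums.get(p-q,0)+c; seen[p] = seen.get(p,0)+1
def stepB (st : Int × PySem.Dict Int Int × PySem.Dict Int Int) (v : Int) :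
    Int × PySem.Dict Int Int × PySem.Dict Int Int :=
  let p := st.1 + v
  let sums := st.2.1.items.foldl
    (fun d qc => d.insert (p - qc.1) (d.getD (p - qc.1) 0 + qc.2)) st.2.2
  (p, st.2.1.insert p (st.2.1.getD p 0 + 1), sums)

def question3_alt (values : List Int) : Int :=
  if values = [] then 0
  else
    let r := values.foldl stepB (0, PySem.Dict.empty.insert 0 1, PySem.Dict.empty)
    -- max(sums.values()): nonempty list here, so .getD 0 is exact
    (PySem.List.max? r.2.2.values (fun x => x)).getD 0

-- ===== PRECONDITION & SPEC =====
def Spec_question3 (values : List Int) (out : Int) : Prop := out = question3_alt values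
instance (values : List Int) (out : Int) : Decidable (Spec_question3 values out) := by unfold Spec_question3; infer_instance

-- ===== CLAIM (what is proved, stated in full; the proofs are below) =====
def Claim_equal_question3 : Prop := ∀ (values : List Int), Dom_question3 values → Spec_question3 values (question3 values)

-- ===== LEMMAS AND PROOFS =====

-- running sums of l starting from accumulator c (A's inner loop values)
def runs (c : Int) : List Int → List Int
  | [] => []
  | x :: t => (c + x) :: runs (c + x) t

-- the list of all subarray sums in A's enumeration order
def subsA (values : List Int) : List Int :=
  ((List.range values.length).map (fun i => runs 0 (values.drop i))).flatten

-- A's per-start count, grouped by start index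
def cntA : List Int → Int → Nat
  | [], _ => 0
  | v :: t, s => (runs 0 (v :: t)).count s + cntA t s

-- B's weighted-pair machinery
def wstep (d : PySem.Dict Int Int) (qc : Int × Int) : PySem.Dict Int Int :=
  d.insert qc.1 (d.getD qc.1 0 + qc.2)

def wlist : List Int → List Int → Int → List (Int × Int)
  | [], _, _ => []
  | v :: t, H, p =>
      (PySem.Dict.counter H).items.map (fun qc => (p + v - qc.1, qc.2))
        ++ wlist t (H ++ [p + v]) (p + v)

def cntW : List Int → List Int → Int → Int → Nat
  | [], _, _, _ => 0
  | v :: t, H, p, s => H.count (p + v - s) + cntW t (H ++ [p + v]) (p + v) s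

def hsum (H : List Int) (p : Int) (l : List Int) (s : Int) : Nat :=
  (H.map (fun h => (runs (p - h) l).count s)).sum

def wcount (L : List (Int × Int)) (s : Int) : Int :=
  ((L.filter (fun qc => qc.1 == s)).map (·.2)).sum

lemma innerA_eq : ∀ (l : List Int) (c : Int) (d : PySem.Dict Int Int),
    (l.foldl (fun (st : Int × PySem.Dict Int Int) x =>
      (st.1 + x, st.2.insert (st.1 + x) (st.2.getD (st.1 + x) 0 + 1))) (c, d)).2
    = (runs c l).foldl (fun d x => d.insert x (d.getD x 0 + 1)) d := by
  intro l
  induction l with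
  | nil => intro c d; rfl
  | cons x t ih => intro c d; simpa [runs] using ih (c + x) (d.insert (c + x) (d.getD (c + x) 0 + 1))

lemma stepA_eq (values : List Int) (d : PySem.Dict Int Int) (k : Nat) :
    stepA values d ((k : Nat) : Int) = (runs 0 (values.drop k)).foldl (fun d x => d.insert x (d.getD x 0 + 1)) d := by
  unfold stepA
  rw [PySem.List.foldl_pyRange_pyGetD' values 0
        (fun (st : Int × PySem.Dict Int Int) x =>
          (st.1 + x, st.2.insert (st.1 + x) (st.2.getD (st.1 + x) 0 + 1)))
        ((0 : Int), d) (by positivity)]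
  rw [Int.toNat_natCast]
  exact innerA_eq (values.drop k) 0 d

lemma scA_eq (values : List Int) :
    (PySem.List.pyRange 0 (values.length : Int) 1).foldl (stepA values) PySem.Dict.empty
      = PySem.Dict.counter (subsA values) := by
  rw [PySem.List.pyRange_one]
  simp only [Int.sub_zero, Int.toNat_natCast, List.foldl_map, Int.zero_add]
  have h1 : ∀ (d : PySem.Dict Int Int) (k : Nat),
      stepA values d (k : Int) = (runs 0 (values.drop k)).foldl (fun d x => d.insert x (d.getD x 0 + 1)) d :=
    fun d k => stepA_eq values d k
  simp only [h1]
  rw [show List.foldl (fun (x : PySem.Dict Int Int) (y : Nat) =>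
        List.foldl (fun d x => d.insert x (d.getD x 0 + 1)) x (runs 0 (List.drop y values)))
        PySem.Dict.empty (List.range values.length)
      = List.foldl (fun (x : PySem.Dict Int Int) (y : List Int) =>
          List.foldl (fun d x => d.insert x (d.getD x 0 + 1)) x y)
        PySem.Dict.empty ((List.range values.length).map (fun k => runs 0 (List.drop k values)))
    from (List.foldl_map ..).symm]
  rw [← List.foldl_flatten]
  exact PySem.Dict.foldl_insert_getD_add_one_eq_counter _

lemma subsA_cons (v : Int) (t : List Int) : subsA (v :: t) = runs 0 (v :: t) ++ subsA t := by
  unfold subsA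
  rw [List.length_cons, List.range_succ_eq_map]
  simp [List.map_map, Function.comp_def]

lemma count_subsA (values : List Int) (s : Int) : (subsA values).count s = cntA values s := by
  induction values with
  | nil => simp [subsA, cntA]
  | cons v t ih => simp [subsA_cons, List.count_append, ih, cntA]

lemma sum_if_count (H : List Int) (c : Int) :
    (H.map (fun h => if h = c then 1 else 0)).sum = H.count c := by
  induction H with
  | nil => simp
  | cons h t ih => by_cases hc : h = c <;> simp [hc, ih] <;> omega

lemma hsum_cons (H : List Int) (p v : Int) (t : List Int) (s : Int) :
    hsum H p (v :: t) s = H.count (p + v - s) + hsum H (p + v) t s := by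
  unfold hsum
  have h1 : ∀ h ∈ H, (runs (p - h) (v :: t)).count s
      = (if h = p + v - s then 1 else 0) + (runs (p + v - h) t).count s := by
    intro h _
    have hpv : p - h + v = p + v - h := by omega
    simp only [runs, List.count_cons, hpv]
    by_cases hc : h = p + v - s
    · have : p + v - h = s := by omega
      simp [hc]
      omega
    · have : ¬ (p + v - h = s) := by omega
      simp [hc, this]
  rw [List.map_congr_left h1]
  have := List.sum_map_add (l := H) (f := fun h => if h = p + v - s then 1 else 0)
      (g := fun h => (runs (p + v - h) t).count s)
  rw [this, sum_if_count]

def cntA' : List Int → Int → Nat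
  | [], _ => 0
  | _ :: t, s => (runs 0 t).count s + cntA' t s

lemma cntA_eq (l : List Int) (s : Int) : cntA l s = (runs 0 l).count s + cntA' l s := by
  induction l with
  | nil => simp [cntA, cntA', runs]
  | cons v t ih => simp [cntA, cntA', ih]

lemma hsum_append_self (H : List Int) (q : Int) (t : List Int) (s : Int) :
    hsum (H ++ [q]) q t s = hsum H q t s + (runs 0 t).count s := by
  unfold hsum
  simp

lemma cntW_eq (s : Int) : ∀ (l H : List Int) (p : Int),
    cntW l H p s = hsum H p l s + cntA' l s := by
  intro l
  induction l with
  | nil => intro H p; simp [cntW, cntA', hsum, runs]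
  | cons v t ih =>
    intro H p
    rw [show cntW (v :: t) H p s = H.count (p + v - s) + cntW t (H ++ [p + v]) (p + v) s from rfl]
    rw [ih (H ++ [p + v]) (p + v), hsum_append_self, hsum_cons]
    simp [cntA']
    omega

lemma cntW_values (values : List Int) (s : Int) : cntW values [0] 0 s = cntA values s := by
  rw [cntW_eq, cntA_eq]
  unfold hsum
  simp

lemma unrollB : ∀ (l : List Int) (H : List Int) (p : Int) (sums : PySem.Dict Int Int),
    (l.foldl stepB (p, PySem.Dict.counter H, sums)).2.2 = (wlist l H p).foldl wstep sums := by
  intro l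
  induction l with
  | nil => intro H p sums; rfl
  | cons v t ih =>
    intro H p sums
    rw [List.foldl_cons]
    have hstep : stepB (p, PySem.Dict.counter H, sums) v
        = (p + v, PySem.Dict.counter (H ++ [p + v]),
           ((PySem.Dict.counter H).items.map (fun qc => (p + v - qc.1, qc.2))).foldl wstep sums) := by
      unfold stepB
      simp only []
      rw [PySem.Dict.counter_append_singleton]
      rw [List.foldl_map]
      rfl
    rw [hstep, ih]
    rw [show wlist (v :: t) H p
        = (PySem.Dict.counter H).items.map (fun qc => (p + v - qc.1, qc.2)) ++ wlist t (H ++ [p + v]) (p + v)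
      from rfl]
    rw [List.foldl_append]

lemma getD_wfold (s : Int) : ∀ (L : List (Int × Int)) (d : PySem.Dict Int Int),
    (L.foldl wstep d).getD s 0 = d.getD s 0 + wcount L s := by
  intro L
  induction L with
  | nil => intro d; simp [wcount]
  | cons kc T ih =>
    intro d
    rw [List.foldl_cons, ih]
    have hw : wcount (kc :: T) s = (if kc.1 = s then kc.2 else 0) + wcount T s := by
      unfold wcount
      by_cases hk : kc.1 = s <;> simp [List.filter_cons, hk]
    rw [hw]
    unfold wstep
    rw [PySem.Dict.getD_insert]
    by_cases hk : s = kc.1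
    · simp [hk]; omega
    · simp [hk, fun h : kc.1 = s => hk h.symm]
      omega

lemma mem_keys_wfold (s : Int) (L : List (Int × Int)) :
    s ∈ (L.foldl wstep PySem.Dict.empty).keys ↔ s ∈ L.map (·.1) := by
  have hw : wstep = fun (d : PySem.Dict Int Int) (qc : Int × Int) =>
      d.insert qc.1 (d.getD qc.1 0 + qc.2) := rfl
  rw [hw, PySem.Dict.keys_foldl_insert_key (key := fun qc : Int × Int => qc.1)
        (f := fun d qc => d.getD qc.1 0 + qc.2)]
  rw [PySem.Dict.keys_empty, PySem.Set.update_nil_left]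
  exact PySem.Set.mem_ofList ..

lemma filter_nodup_beq (a : Int) : ∀ (l : List Int), l.Nodup →
    l.filter (fun x => x == a) = if a ∈ l then [a] else [] := by
  intro l hl
  induction l with
  | nil => simp
  | cons h t ih =>
    rcases List.nodup_cons.mp hl with ⟨hnm, hnd⟩
    by_cases hha : h = a
    · subst hha
      have : t.filter (fun x => x == h) = [] :=
        List.filter_eq_nil_iff.mpr (by intro b hb; simp; rintro rfl; exact hnm hb)
      simp [this]
    · have := ih hnd
      by_cases hat : a ∈ t <;> simp [hha, Ne.symm hha, hat, this]

lemma chunk_wcount (H : List Int) (P s : Int) :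
    wcount ((PySem.Dict.counter H).items.map (fun qc => (P - qc.1, qc.2))) s
      = (H.count (P - s) : Int) := by
  unfold wcount
  rw [PySem.Dict.items_counter, List.map_map]
  rw [List.filter_map, List.map_map]
  have hpred : (PySem.Set.ofList H).filter
        ((fun qc : Int × Int => qc.1 == s) ∘ ((fun qc : Int × Int => (P - qc.1, qc.2)) ∘ fun k => (k, (H.count k : Int))))
      = (PySem.Set.ofList H).filter (fun k => k == P - s) := by
    apply List.filter_congr
    intro k _
    simp only [Function.comp_apply]
    by_cases hk : k = P - s
    · have : P - k = s := by omega
      simp [hk, this]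
    · have : ¬ (P - k = s) := by omega
      simp [hk, this]
  rw [hpred, filter_nodup_beq _ _ (PySem.Set.nodup_ofList H)]
  by_cases hm : (P - s) ∈ H
  · rw [if_pos ((PySem.Set.mem_ofList ..).mpr hm)]
    simp
  · rw [if_neg (fun hc => hm ((PySem.Set.mem_ofList ..).mp hc))]
    simp [List.count_eq_zero.mpr hm]

lemma chunk_keys (H : List Int) (P s : Int) :
    s ∈ ((PySem.Dict.counter H).items.map (fun qc => (P - qc.1, qc.2))).map (·.1) ↔ (P - s) ∈ H := by
  rw [PySem.Dict.items_counter]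
  simp only [List.map_map, List.mem_map, Function.comp_apply]
  constructor
  · rintro ⟨k, hk, rfl⟩
    have : P - (P - k) = k := by omega
    rw [this]
    exact (PySem.Set.mem_ofList ..).mp hk
  · intro hm
    exact ⟨P - s, (PySem.Set.mem_ofList ..).mpr hm, by omega⟩

lemma wlist_spec (s : Int) : ∀ (l H : List Int) (p : Int),
    wcount (wlist l H p) s = (cntW l H p s : Int)
      ∧ (s ∈ (wlist l H p).map (·.1) ↔ cntW l H p s ≠ 0) := by
  intro l
  induction l with
  | nil => intro H p; simp [wlist, cntW, wcount]
  | cons v t ih =>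
    intro H p
    obtain ⟨ih1, ih2⟩ := ih (H ++ [p + v]) (p + v)
    have hw : wcount (wlist (v :: t) H p) s
        = wcount ((PySem.Dict.counter H).items.map (fun qc => (p + v - qc.1, qc.2))) s
          + wcount (wlist t (H ++ [p + v]) (p + v)) s := by
      unfold wcount
      rw [show wlist (v :: t) H p
          = (PySem.Dict.counter H).items.map (fun qc => (p + v - qc.1, qc.2)) ++ wlist t (H ++ [p + v]) (p + v)
        from rfl]
      rw [List.filter_append, List.map_append, List.sum_append]
    constructor
    · rw [hw, chunk_wcount, ih1]
      push_cast [cntW]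
      ring
    · rw [show wlist (v :: t) H p
          = (PySem.Dict.counter H).items.map (fun qc => (p + v - qc.1, qc.2)) ++ wlist t (H ++ [p + v]) (p + v)
        from rfl]
      rw [List.map_append, List.mem_append, chunk_keys, ih2]
      rw [show cntW (v :: t) H p s = H.count (p + v - s) + cntW t (H ++ [p + v]) (p + v) s from rfl]
      have hc : (p + v - s) ∈ H ↔ H.count (p + v - s) ≠ 0 := by
        rw [← List.count_pos_iff]
        omega
      rw [hc]
      omega

lemma mem_values_iff (d : PySem.Dict Int Int) (hnd : d.keys.Nodup) (v : Int) :
    v ∈ d.values ↔ ∃ k ∈ d.keys, d.getD k 0 = v := by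
  rw [PySem.Dict.values_eq_map_keys d hnd 0]
  simp [List.mem_map]

lemma max_getD_congr (l l' : List Int) (h : ∀ x, x ∈ l ↔ x ∈ l') (hl : l ≠ []) :
    (PySem.List.max? l (fun x => x)).getD 0 = (PySem.List.max? l' (fun x => x)).getD 0 := by
  have hl' : l' ≠ [] := by
    cases l with
    | nil => exact absurd rfl hl
    | cons x t => intro hnil; have := (h x).mp (List.mem_cons_self ..); simp [hnil] at this
  cases hm : PySem.List.max? l (fun x => x) with
  | none => rw [PySem.List.max?_eq_none_iff] at hm; exact absurd hm hl
  | some m =>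
    cases hm' : PySem.List.max? l' (fun x => x) with
    | none => rw [PySem.List.max?_eq_none_iff] at hm'; exact absurd hm' hl'
    | some m' =>
      have h1 : m ∈ l := PySem.List.max?_mem hm
      have h2 : m' ∈ l' := PySem.List.max?_mem hm'
      have le1 := PySem.List.max?_isMax hm' m ((h m).mp h1)
      have le2 := PySem.List.max?_isMax hm m' ((h m').mpr h2)
      simp at le1 le2 ⊢
      omega

lemma nodup_keys_wfold (L : List (Int × Int)) : (L.foldl wstep PySem.Dict.empty).keys.Nodup := by
  have hw : wstep = fun (d : PySem.Dict Int Int) (qc : Int × Int) =>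
      d.insert qc.1 (d.getD qc.1 0 + qc.2) := rfl
  rw [hw]
  exact PySem.Dict.nodup_keys_foldl_insert_key L (fun qc : Int × Int => qc.1)
    (fun d qc => d.getD qc.1 0 + qc.2) PySem.Dict.empty (by simp [PySem.Dict.keys_empty])

-- ===== VERDICT (by name: the statement is the Claim_ definition above) =====
theorem question3_spec : Claim_equal_question3 := by
  intro values _
  unfold Spec_question3
  cases values with
  | nil => rfl
  | cons v t =>
    unfold question3 question3_alt
    have hne : (v :: t : List Int) ≠ [] := by simp
    rw [if_neg hne, if_neg hne]
    simp only [scA_eq]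
    have h01 : (PySem.Dict.empty.insert (0 : Int) (1 : Int)) = PySem.Dict.counter [0] := by decide
    rw [h01, unrollB (v :: t) [0] 0 PySem.Dict.empty]
    -- the two dictionaries
    have hDgetD : ∀ s : Int, (PySem.Dict.counter (subsA (v :: t))).getD s 0 = (cntA (v :: t) s : Int) := by
      intro s
      rw [PySem.Dict.getD_counter, count_subsA]
    have hEgetD : ∀ s : Int,
        ((wlist (v :: t) [0] 0).foldl wstep PySem.Dict.empty).getD s 0 = (cntA (v :: t) s : Int) := by
      intro s
      rw [getD_wfold, PySem.Dict.getD_empty, (wlist_spec s (v :: t) [0] 0).1, cntW_values]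
      simp
    have hDkeys : ∀ s : Int, s ∈ (PySem.Dict.counter (subsA (v :: t))).keys ↔ cntA (v :: t) s ≠ 0 := by
      intro s
      rw [PySem.Dict.keys_counter, PySem.Set.mem_ofList, ← count_subsA, ← List.count_pos_iff]
      omega
    have hEkeys : ∀ s : Int,
        s ∈ ((wlist (v :: t) [0] 0).foldl wstep PySem.Dict.empty).keys ↔ cntA (v :: t) s ≠ 0 := by
      intro s
      rw [mem_keys_wfold, (wlist_spec s (v :: t) [0] 0).2, cntW_values]
    have hmem : ∀ x : Int, x ∈ (PySem.Dict.counter (subsA (v :: t))).values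
        ↔ x ∈ ((wlist (v :: t) [0] 0).foldl wstep PySem.Dict.empty).values := by
      intro x
      rw [mem_values_iff _ (PySem.Dict.nodup_keys_counter _) x,
          mem_values_iff _ (nodup_keys_wfold _) x]
      constructor
      · rintro ⟨k, hk, rfl⟩
        exact ⟨k, (hEkeys k).mpr ((hDkeys k).mp hk), by rw [hEgetD, hDgetD]⟩
      · rintro ⟨k, hk, rfl⟩
        exact ⟨k, (hDkeys k).mpr ((hEkeys k).mp hk), by rw [hEgetD, hDgetD]⟩
    have hvmem : v ∈ subsA (v :: t) := by
      rw [subsA_cons]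
      have : v ∈ runs 0 (v :: t) := by
        rw [show runs 0 (v :: t) = (0 + v) :: runs (0 + v) t from rfl]
        simp
      exact List.mem_append.mpr (Or.inl this)
    have hkv : v ∈ (PySem.Dict.counter (subsA (v :: t))).keys := by
      rw [hDkeys, ← count_subsA, ← List.count_pos_iff] at *
      omega
    have hvals_ne : (PySem.Dict.counter (subsA (v :: t))).values ≠ [] := by
      have : (PySem.Dict.counter (subsA (v :: t))).getD v 0
          ∈ (PySem.Dict.counter (subsA (v :: t))).values :=
        (mem_values_iff _ (PySem.Dict.nodup_keys_counter _) _).mpr ⟨v, hkv, rfl⟩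
      exact List.ne_nil_of_mem this
    have hitems : (PySem.Dict.counter (subsA (v :: t))).items ≠ [] := by
      intro hit
      have : (PySem.Dict.counter (subsA (v :: t))).keys = [] := by
        simp only [PySem.Dict.keys, hit, List.map_nil]
      rw [this] at hkv
      exact List.not_mem_nil hkv
    rw [if_pos hitems]
    exact max_getD_congr _ _ hmem hvals_ne
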